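-- pv_equiv track=rewrite | github.com/clld/cariban | cariban_morphemes/util.py | split_word
-- ===== SOURCE A (Python) =====
-- def split_word(word):
--     output = []
--     char_list = list(word)
--     for i, char in enumerate(char_list):
--         if len(output) == 0 or (char in ["-", "=", "~"] or output[-1] in ["-", "=", "~"]):
--             output.append(char)
--         else:
--             output[-1]+=char
--     return output
-- ===== SOURCE B (Python) =====
-- def split_word(word):
--     tokens = []
--     i = 0
--     n = len(word)
--     while i < n:
--         if word[i] in "-=~":
--             tokens.append(word[i])
--             i += 1
--         else:
--             j = i
--             while j < n and word[j] not in "-=~":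
--                 j += 1
--             tokens.append(word[i:j])
--             i = j
--     return tokens
-- ===== Notes on version B (the rewrite author's own statement) =====
-- stated objective: faster
-- what changed: Replaces A's per-character accumulator (append a new token or concatenate onto the mutable last token) with a two-pointer run scanner that emits each separator directly and slices out each maximal non-separator run in one step.
import Mathlib
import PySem

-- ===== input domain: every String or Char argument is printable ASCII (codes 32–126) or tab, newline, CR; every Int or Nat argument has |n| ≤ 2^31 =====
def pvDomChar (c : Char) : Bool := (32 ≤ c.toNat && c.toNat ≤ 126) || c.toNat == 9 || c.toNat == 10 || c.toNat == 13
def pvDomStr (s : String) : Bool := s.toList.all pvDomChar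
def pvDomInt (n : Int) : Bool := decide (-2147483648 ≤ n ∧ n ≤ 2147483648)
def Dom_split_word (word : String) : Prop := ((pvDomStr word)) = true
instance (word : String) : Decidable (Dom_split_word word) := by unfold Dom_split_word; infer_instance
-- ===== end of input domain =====

-- B replaces A's per-character append/concatenate accumulator with a maximal-run scanner; return values proved equal.
-- ===== PORT A =====
def isSepChar (c : Char) : Bool := c == '-' || c == '=' || c == '~'

def isSepStr (s : String) : Bool := s == "-" || s == "=" || s == "~"

def splitStepA (output : List String) (c : Char) : List String :=
  if output.length = 0 || (isSepChar c || isSepStr (output.getLast?.getD "")) then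
    output ++ [String.ofList [c]]
  else
    output.dropLast ++ [output.getLast?.getD "" ++ String.ofList [c]]

def split_word (word : String) : List String :=
  word.toList.foldl splitStepA []

-- ===== PORT B =====
def tokenizeB : List Char → List String
  | [] => []
  | c :: rest =>
    if isSepChar c then
      String.ofList [c] :: tokenizeB rest
    else
      String.ofList (c :: rest.takeWhile (fun d => !isSepChar d)) ::
        tokenizeB (rest.dropWhile (fun d => !isSepChar d))
termination_by l => l.length
decreasing_by
  · simp
  · simp; exact List.length_dropWhile_le _ _

def split_word_alt (word : String) : List String :=
  tokenizeB word.toList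

-- ===== PRECONDITION & SPEC =====
def Spec_split_word (word : String) (out : List String) : Prop := out = split_word_alt word
instance (word : String) (out : List String) : Decidable (Spec_split_word word out) := by unfold Spec_split_word; infer_instance

-- ===== CLAIM (what is proved, stated in full; the proofs are below) =====
def Claim_equal_split_word : Prop := ∀ (word : String), Dom_split_word word → Spec_split_word word (split_word word)

-- ===== LEMMAS AND PROOFS =====

theorem tokenizeB_nil : tokenizeB [] = [] := by rw [tokenizeB]

theorem tokenizeB_cons_sep (c : Char) (rest : List Char) (h : isSepChar c = true) :
    tokenizeB (c :: rest) = String.ofList [c] :: tokenizeB rest := by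
  rw [tokenizeB]; simp [h]

theorem tokenizeB_cons_nonsep (c : Char) (rest : List Char) (h : isSepChar c = false) :
    tokenizeB (c :: rest) =
      String.ofList (c :: rest.takeWhile (fun d => !isSepChar d)) ::
        tokenizeB (rest.dropWhile (fun d => !isSepChar d)) := by
  rw [tokenizeB]; simp [h]

theorem sepStr_single_true (c : Char) (h : isSepChar c = true) :
    isSepStr (String.ofList [c]) = true := by
  have h' : (c = '-' ∨ c = '=') ∨ c = '~' := by simpa [isSepChar] using h
  rcases h' with (h' | h') | h' <;> subst h' <;> decide

theorem sepStr_single_false (c : Char) (h : isSepChar c = false) :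
    isSepStr (String.ofList [c]) = false := by
  simp [isSepChar] at h
  simp [isSepStr, String.ext_iff]
  tauto

theorem isSepStr_long (a b : Char) (t : List Char) : isSepStr (String.ofList (a :: b :: t)) = false := by
  simp [isSepStr, String.ext_iff]

-- joint loop invariant: A's fold from a "fresh" state (resp. mid-token state) equals B's tokenizer
theorem fold_tokenize (cs : List Char) :
    (∀ acc : List String, (acc = [] ∨ isSepStr (acc.getLast?.getD "") = true) →
        cs.foldl splitStepA acc = acc ++ tokenizeB cs) ∧
    (∀ (acc : List String) (s : List Char), s ≠ [] → isSepStr (String.ofList s) = false →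
        cs.foldl splitStepA (acc ++ [String.ofList s]) =
          acc ++ String.ofList (s ++ cs.takeWhile (fun d => !isSepChar d)) ::
            tokenizeB (cs.dropWhile (fun d => !isSepChar d))) := by
  induction cs with
  | nil =>
    constructor
    · intro acc _; simp [tokenizeB_nil]
    · intro acc s _ _; simp [tokenizeB_nil]
  | cons c rest ih =>
    obtain ⟨ih1, ih2⟩ := ih
    constructor
    · intro acc hacc
      by_cases hc : isSepChar c = true
      · have hstep : splitStepA acc c = acc ++ [String.ofList [c]] := by
          simp [splitStepA, hc]
        rw [List.foldl_cons, hstep,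
          ih1 (acc ++ [String.ofList [c]]) (Or.inr (by simp [sepStr_single_true c hc]))]
        simp [tokenizeB_cons_sep c rest hc]
      · have hc' : isSepChar c = false := by simpa using hc
        have hstep : splitStepA acc c = acc ++ [String.ofList [c]] := by
          rcases hacc with h | h <;> simp [splitStepA, h]
        rw [List.foldl_cons, hstep, ih2 acc [c] (by simp) (sepStr_single_false c hc')]
        simp [tokenizeB_cons_nonsep c rest hc']
    · intro acc s hs hsep
      by_cases hc : isSepChar c = true
      · have hstep : splitStepA (acc ++ [String.ofList s]) c
            = (acc ++ [String.ofList s]) ++ [String.ofList [c]] := by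
          simp [splitStepA, hc]
        rw [List.foldl_cons, hstep,
          ih1 ((acc ++ [String.ofList s]) ++ [String.ofList [c]])
            (Or.inr (by simp [sepStr_single_true c hc]))]
        simp [tokenizeB_cons_sep c rest hc, hc]
      · have hc' : isSepChar c = false := by simpa using hc
        have hstep : splitStepA (acc ++ [String.ofList s]) c
            = acc ++ [String.ofList (s ++ [c])] := by
          simp [splitStepA, hc', hsep]
        have hsep' : isSepStr (String.ofList (s ++ [c])) = false := by
          cases s with
          | nil => exact absurd rfl hs
          | cons a t => cases t with
            | nil => exact isSepStr_long a c []
            | cons b u => exact isSepStr_long a b (u ++ [c])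
        rw [List.foldl_cons, hstep, ih2 acc (s ++ [c]) (by simp) hsep']
        simp [hc']

-- ===== VERDICT (by name: the statement is the Claim_ definition above) =====
theorem split_word_spec : Claim_equal_split_word := by
  intro word _
  unfold Spec_split_word split_word split_word_alt
  simpa using (fold_tokenize word.toList).1 [] (Or.inl rfl)
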